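-- pv_equiv track=rewrite | github.com/Alpha-Leporis/code | questions/HR/find_minimum_moves_word.py | min_moves_to_minimal
-- ===== SOURCE A (Python) =====
-- def min_moves_to_minimal(word):
--     # Dictionary to store the index of first occurrence of each character
--     char_index = {}
--
--     # Set to store encountered characters
--     encountered_chars = set()
--
--     # Initialize minimum moves
--     min_moves = 0
--
--     # Iterate through each character in the word
--     for i, char in enumerate(word):
--         # If the character is encountered for the first time
--         if char not in encountered_chars:
--             # Update the index of first occurrence of the character
--             char_index[char] = i
--             encountered_chars.add(char)
--         else:
--             # Calculate the distance to the nearest occurrences on the left and right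
--             left_dist = i - char_index[char]
--             right_dist = len(word) - i
--             # Update minimum moves
--             min_moves += min(left_dist, right_dist)
--             # Update the index of first occurrence of the character
--             char_index[char] = i
--
--     return min_moves
-- ===== SOURCE B (Python) =====
-- def min_moves_to_minimal(word):
--     # For each position i, scan backwards for the previous occurrence of word[i];
--     # if one exists at j, add min(i - j, len(word) - i).
--     n = len(word)
--     total = 0
--     for i in range(n):
--         c = word[i]
--         for j in range(i - 1, -1, -1):
--             if word[j] == c:
--                 total += min(i - j, n - i)
--                 break
--     return total
-- ===== Notes on version B (the rewrite author's own statement) =====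
-- stated objective: alternative
-- what changed: Replaced A's single pass maintaining a last-index dict and an encountered set with a stateless per-index backward scan: for each position the previous occurrence of its character is found by scanning left, and min(i - j, n - i) is accumulated.
import Mathlib
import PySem

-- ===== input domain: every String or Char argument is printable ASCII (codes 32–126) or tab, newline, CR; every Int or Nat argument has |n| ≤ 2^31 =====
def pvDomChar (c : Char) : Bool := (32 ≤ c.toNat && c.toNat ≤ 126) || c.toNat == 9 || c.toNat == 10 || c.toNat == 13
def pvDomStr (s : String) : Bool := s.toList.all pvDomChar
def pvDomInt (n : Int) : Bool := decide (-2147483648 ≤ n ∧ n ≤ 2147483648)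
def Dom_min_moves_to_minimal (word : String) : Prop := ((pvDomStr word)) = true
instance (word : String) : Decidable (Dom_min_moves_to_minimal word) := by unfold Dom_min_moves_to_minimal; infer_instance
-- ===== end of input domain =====

-- B replaces A's running last-index dict with a stateless per-index backward scan
-- for the previous occurrence (alternative decomposition; not faster).

-- ===== PORT A =====
-- loop body of A: state = (char_index, encountered_chars, min_moves), p = (i, char)
def pvStepA (n : Int) (st : PySem.Dict Char Int × PySem.Set Char × Int)
    (p : Int × Char) : PySem.Dict Char Int × PySem.Set Char × Int :=
  if ¬ (PySem.Set.contains st.2.1 p.2) then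
    (st.1.insert p.2 p.1, PySem.Set.add st.2.1 p.2, st.2.2)
  else
    -- char_index[char] never raises here: the key is present whenever this branch runs
    (st.1.insert p.2 p.1, st.2.1, st.2.2 + min (p.1 - st.1.getD p.2 0) (n - p.1))

def min_moves_to_minimal (word : String) : Int :=
  ((PySem.List.enumerate word.toList).foldl (pvStepA (PySem.Str.len word))
      (PySem.Dict.empty, PySem.Set.empty, 0)).2.2

-- ===== PORT B =====
-- inner loop of B: scan j = i-1, i-2, …, 0 for the previous occurrence of c
def pvFindPrev (cs : List Char) (c : Char) : Nat → Option Nat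
  | 0 => none
  | j + 1 => if cs.getD j ' ' = c then some j else pvFindPrev cs c j

-- outer-loop body of B
def pvStepB (cs : List Char) (n : Int) (total : Int) (i : Nat) : Int :=
  match pvFindPrev cs (cs.getD i ' ') i with
  | some j => total + min ((i : Int) - (j : Int)) (n - (i : Int))
  | none => total

def min_moves_to_minimal_alt (word : String) : Int :=
  (List.range word.toList.length).foldl
    (pvStepB word.toList (word.toList.length : Int)) 0

-- ===== PRECONDITION & SPEC =====
def Spec_min_moves_to_minimal (word : String) (out : Int) : Prop := out = min_moves_to_minimal_alt word
instance (word : String) (out : Int) : Decidable (Spec_min_moves_to_minimal word out) := by unfold Spec_min_moves_to_minimal; infer_instance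

-- ===== CLAIM (what is proved, stated in full; the proofs are below) =====
def Claim_equal_min_moves_to_minimal : Prop := ∀ (word : String), Dom_min_moves_to_minimal word → Spec_min_moves_to_minimal word (min_moves_to_minimal word)

-- ===== LEMMAS AND PROOFS =====

-- A's state after processing the first m characters
def pvA (cs : List Char) (n : Int) (m : Nat) :
    PySem.Dict Char Int × PySem.Set Char × Int :=
  (PySem.List.enumerate (cs.take m)).foldl (pvStepA n) (PySem.Dict.empty, PySem.Set.empty, 0)

lemma pvEnum_append_singleton {α : Type} (xs : List α) (x : α) (s : Int) :
    PySem.List.enumerate (xs ++ [x]) s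
      = PySem.List.enumerate xs s ++ [(s + (xs.length : Int), x)] := by
  induction xs generalizing s with
  | nil => simp [PySem.List.enumerate_nil, PySem.List.enumerate_cons]
  | cons y ys ih =>
      simp [PySem.List.enumerate_cons, ih]
      ring_nf

lemma pvContains_add (s : PySem.Set Char) (x y : Char) :
    PySem.Set.contains (PySem.Set.add s x) y
      = (PySem.Set.contains s y || y == x) := by
  by_cases hy : y = x
  · subst hy
    by_cases h : PySem.Set.contains s y = true
    · have hm : y ∈ s := by simpa [PySem.Set.contains] using h
      simp [PySem.Set.add, PySem.Set.contains, hm]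
    · have hm : y ∉ s := by simpa [PySem.Set.contains] using h
      simp [PySem.Set.add, PySem.Set.contains, hm]
  · by_cases h : PySem.Set.contains s x = true
    · have hm : x ∈ s := by simpa [PySem.Set.contains] using h
      simp [PySem.Set.add, PySem.Set.contains, hm, hy]
    · have hm : x ∉ s := by simpa [PySem.Set.contains] using h
      simp [PySem.Set.add, PySem.Set.contains, hm, hy]

lemma pvStepA_not_mem (n : Int) (st : PySem.Dict Char Int × PySem.Set Char × Int)
    (p : Int × Char) (h : PySem.Set.contains st.2.1 p.2 = false) :
    pvStepA n st p = (st.1.insert p.2 p.1, PySem.Set.add st.2.1 p.2, st.2.2) := by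
  have hmem : p.2 ∉ st.2.1 := by simpa [PySem.Set.contains] using h
  simp [pvStepA, PySem.Set.contains, hmem]

lemma pvStepA_mem (n : Int) (st : PySem.Dict Char Int × PySem.Set Char × Int)
    (p : Int × Char) (h : PySem.Set.contains st.2.1 p.2 = true) :
    pvStepA n st p
      = (st.1.insert p.2 p.1, st.2.1, st.2.2 + min (p.1 - st.1.getD p.2 0) (n - p.1)) := by
  have hmem : p.2 ∈ st.2.1 := by simpa [PySem.Set.contains] using h
  simp [pvStepA, PySem.Set.contains, hmem]

lemma pvFindPrev_succ (cs : List Char) (c : Char) (m : Nat) :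
    pvFindPrev cs c (m + 1)
      = if cs.getD m ' ' = c then some m else pvFindPrev cs c m := rfl

-- the main invariant: A's dict is "previous occurrence", A's set is "seen before",
-- A's counter is B's partial sum
lemma pvInv (cs : List Char) (n : Int) (m : Nat) (hm : m ≤ cs.length) :
    (∀ c, (pvA cs n m).1.get? c = (pvFindPrev cs c m).map (fun j => (j : Int)))
    ∧ (∀ c, PySem.Set.contains (pvA cs n m).2.1 c = (pvFindPrev cs c m).isSome)
    ∧ (pvA cs n m).2.2 = (List.range m).foldl (pvStepB cs n) 0 := by
  induction m with
  | zero =>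
      refine ⟨fun c => ?_, fun c => ?_, ?_⟩ <;>
        simp [pvA, PySem.List.enumerate_nil, pvFindPrev, PySem.Set.contains]
  | succ m ih =>
      have hm' : m < cs.length := hm
      obtain ⟨ih1, ih2, ih3⟩ := ih (Nat.le_of_lt hm')
      have hc : cs.getD m ' ' = cs[m] := List.getD_eq_getElem cs ' ' hm'
      have htake : cs.take (m + 1) = cs.take m ++ [cs[m]] := by
        rw [List.take_add_one, List.getElem?_eq_getElem hm']
        rfl
      have hlen : (cs.take m).length = m := by
        simp [List.length_take, Nat.le_of_lt hm']
      have hstep : pvA cs n (m + 1) = pvStepA n (pvA cs n m) ((m : Int), cs[m]) := by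
        rw [pvA, htake, pvEnum_append_singleton, List.foldl_append, hlen]
        simp [pvA]
      have hrange : (List.range (m + 1)).foldl (pvStepB cs n) 0
          = pvStepB cs n ((List.range m).foldl (pvStepB cs n) 0) m := by
        rw [List.range_succ, List.foldl_append]
        rfl
      by_cases hnew : (pvFindPrev cs (cs[m]) m).isSome
      · -- duplicate: a previous occurrence exists
        obtain ⟨j, hj⟩ := Option.isSome_iff_exists.mp hnew
        have hcont : PySem.Set.contains (pvA cs n m).2.1 cs[m] = true := by
          rw [ih2]; simp [hj]
        rw [hstep, pvStepA_mem n _ _ hcont]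
        refine ⟨fun c => ?_, fun c => ?_, ?_⟩
        · rw [pvFindPrev_succ, hc]
          by_cases hcc : c = cs[m]
          · subst hcc
            simp [PySem.Dict.get?_insert_self]
          · rw [if_neg (Ne.symm hcc), PySem.Dict.get?_insert_of_ne _ _ hcc, ih1]
        · rw [pvFindPrev_succ, hc]
          by_cases hcc : c = cs[m]
          · subst hcc
            rw [if_pos rfl, Option.isSome_some]
            exact hcont
          · rw [if_neg (Ne.symm hcc), ih2]
        · rw [hrange]
          simp only [pvStepB, hc, hj]
          have hgd : (pvA cs n m).1.getD cs[m] 0 = (j : Int) := by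
            simp [PySem.Dict.getD, ih1, hj]
          simp [hgd, ih3]
      · -- first occurrence of this character
        have hcont : PySem.Set.contains (pvA cs n m).2.1 cs[m] = false := by
          rw [ih2]; simp_all
        have hnone : pvFindPrev cs (cs[m]) m = none :=
          Option.not_isSome_iff_eq_none.mp hnew
        rw [hstep, pvStepA_not_mem n _ _ hcont]
        refine ⟨fun c => ?_, fun c => ?_, ?_⟩
        · rw [pvFindPrev_succ, hc]
          by_cases hcc : c = cs[m]
          · subst hcc
            simp [PySem.Dict.get?_insert_self]
          · rw [if_neg (Ne.symm hcc), PySem.Dict.get?_insert_of_ne _ _ hcc, ih1]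
        · rw [pvFindPrev_succ, hc, pvContains_add]
          by_cases hcc : c = cs[m]
          · subst hcc
            rw [hcont, if_pos rfl, Option.isSome_some]
            simp
          · rw [if_neg (Ne.symm hcc), ih2]
            simp [hcc]
        · rw [hrange]
          simp only [pvStepB, hc, hnone]
          exact ih3

-- ===== VERDICT (by name: the statement is the Claim_ definition above) =====
theorem min_moves_to_minimal_spec : Claim_equal_min_moves_to_minimal := by
  intro word _
  unfold Spec_min_moves_to_minimal min_moves_to_minimal min_moves_to_minimal_alt
  have h := (pvInv word.toList (word.toList.length : Int) word.toList.length le_rfl).2.2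
  rw [pvA, List.take_length] at h
  simpa [PySem.Str.len_eq] using h
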